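-- pv_equiv track=rewrite | github.com/absinthe4902/thursday_algo_study | seungmin/week_1/hash2.py | solution
-- ===== SOURCE A (Python) =====
-- def solution(phone_book):
--     phone_book.sort()
--     sliced = []
--     first = phone_book[0]
--
--     for num in range(1, len(phone_book)):
--         sliced.append(phone_book[num][0:len(first)])
--
--     if first in sliced:
--         return False
--
--     return True
-- ===== SOURCE B (Python) =====
-- def solution(phone_book):
--     first = min(phone_book)
--     hits = 0
--     for s in phone_book:
--         if s[0:len(first)] == first:
--             hits += 1
--     return hits == 1
-- ===== Notes on version B (the rewrite author's own statement) =====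
-- stated objective: alternative
-- what changed: B drops the sort entirely: it takes first = min(phone_book) and counts in one pass how many entries (including first itself) have first as a length-len(first) prefix, returning hits == 1, instead of A's sort + building the list of tail prefixes + membership scan; unlike A, B does not mutate the input list.
import Mathlib
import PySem

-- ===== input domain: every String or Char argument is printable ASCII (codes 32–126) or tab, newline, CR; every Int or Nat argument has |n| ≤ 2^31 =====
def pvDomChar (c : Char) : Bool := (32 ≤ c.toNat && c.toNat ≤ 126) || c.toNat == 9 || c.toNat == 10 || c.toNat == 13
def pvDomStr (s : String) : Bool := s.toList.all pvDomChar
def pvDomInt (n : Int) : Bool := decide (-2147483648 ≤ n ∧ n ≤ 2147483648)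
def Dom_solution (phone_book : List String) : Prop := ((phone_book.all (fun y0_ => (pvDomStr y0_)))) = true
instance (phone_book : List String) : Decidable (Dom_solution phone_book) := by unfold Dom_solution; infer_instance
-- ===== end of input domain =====

-- B drops the sort: first = min(phone_book), then one counting pass over prefixes, return hits == 1
-- (alternative decomposition; A sorts the list in place, B does not mutate it — return values agree).

-- ===== PORT A =====
def solution (phone_book : List String) : Bool :=
  let pb := PySem.List.sorted phone_book (fun x => x) false
  match PySem.List.pyGet? pb 0 with
  | none => false   -- IndexError on [], excluded by Pre_
  | some first =>
    let sliced := (PySem.List.pyRange 1 (pb.length : Int) 1).foldl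
      (fun acc num => acc ++ [PySem.Str.slice (PySem.List.pyGetD pb num "") (some 0) (some (PySem.Str.len first))])
      ([] : List String)
    if first ∈ sliced then false else true

-- ===== PORT B =====
def solution_alt (phone_book : List String) : Bool :=
  match PySem.List.min? phone_book (fun x => x) with
  | none => false   -- ValueError on min([]), excluded by Pre_
  | some first =>
    let hits := phone_book.foldl
      (fun acc s => if PySem.Str.slice s (some 0) (some (PySem.Str.len first)) = first then acc + 1 else acc)
      (0 : Int)
    hits == 1

-- ===== PRECONDITION & SPEC =====
-- Pre_ excludes only the empty list, on which A raises IndexError (and B raises ValueError).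
def Pre_solution (phone_book : List String) : Prop := phone_book ≠ []
instance (phone_book : List String) : Decidable (Pre_solution phone_book) := by unfold Pre_solution; infer_instance
def pvWitness_solution : List String := (["119", "97", "1195524421"])

def Spec_solution (phone_book : List String) (out : Bool) : Prop := out = solution_alt phone_book
instance (phone_book : List String) (out : Bool) : Decidable (Spec_solution phone_book out) := by unfold Spec_solution; infer_instance

-- ===== CLAIM (what is proved, stated in full; the proofs are below) =====
def Claim_equal_solution : Prop := ∀ (phone_book : List String), Dom_solution phone_book → Pre_solution phone_book → Spec_solution phone_book (solution phone_book)

-- ===== LEMMAS AND PROOFS =====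

-- the slice s[0:len(first)] equals first iff first is a prefix (on code points)
theorem slice_eq_first_iff (s first : String) :
    (PySem.Str.slice s (some 0) (some (first.length : Int)) = first) ↔ first.toList <+: s.toList := by
  constructor
  · intro h
    have := congrArg String.toList h
    simp only [PySem.Str.toList_slice, PySem.Chars.slice_eq_listSlice, PySem.List.slice_zero_start] at this
    rw [PySem.List.slice_to s.toList (b := (first.length : Int)) (by positivity)] at this
    rw [List.prefix_iff_eq_take, ← this]
    simp
  · intro h
    apply String.toList_inj.mp
    simp only [PySem.Str.toList_slice, PySem.Chars.slice_eq_listSlice, PySem.List.slice_zero_start]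
    rw [PySem.List.slice_to s.toList (b := (first.length : Int)) (by positivity)]
    simp only [Int.toNat_natCast]
    have : first.length = first.toList.length := by simp
    rw [this]
    exact ((List.prefix_iff_eq_take).mp h).symm

-- main equivalence on a non-empty input
theorem solution_eq_alt (phone_book : List String) (hne : phone_book ≠ []) :
    solution phone_book = solution_alt phone_book := by
  unfold solution solution_alt
  have hpbne : PySem.List.sorted phone_book (fun x => x) false ≠ [] := by
    rw [Ne, PySem.List.sorted_eq_nil_iff]; exact hne
  obtain ⟨first, rest, hcons⟩ := List.exists_cons_of_ne_nil hpbne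
  -- the head of the sorted list is min(phone_book)
  obtain ⟨m, hm⟩ := Option.ne_none_iff_exists'.mp
    (fun h => hne ((PySem.List.min?_eq_none_iff phone_book (fun x => x)).mp h))
  have hmf : m = first := by
    have hmin : ∀ y ∈ phone_book, m ≤ y := PySem.List.min?_isMin hm
    have hfirstmem : first ∈ phone_book := by
      rw [← PySem.List.mem_sorted (rev := false) (key := fun x => x), hcons]
      exact List.mem_cons_self
    have hmmem : m ∈ phone_book := PySem.List.min?_mem hm
    have hhead : ∀ y ∈ phone_book, first ≤ y :=
      PySem.List.key_head_sorted_le phone_book (fun x => x) hcons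
    exact le_antisymm (hmin first hfirstmem) (hhead m hmmem)
  rw [hcons, hm, hmf]
  simp only [PySem.List.pyGet?, PySem.List.pyIdx?]
  norm_num
  -- reduce A's fold to a map over rest
  have hfold : (PySem.List.pyRange 1 ((first :: rest).length : Int) 1).foldl
      (fun acc num => acc ++ [PySem.Str.slice (PySem.List.pyGetD (first :: rest) num "") (some 0) (some (PySem.Str.len first))])
      ([] : List String)
      = rest.map (fun s => PySem.Str.slice s (some 0) (some (first.length : Int))) := by
    rw [PySem.List.foldl_pyRange_pyGetD' (first :: rest) ""
        (fun acc s => acc ++ [PySem.Str.slice s (some 0) (some (PySem.Str.len first))])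
        [] (by norm_num : (0:Int) ≤ 1)]
    rw [PySem.List.foldl_append_singleton_eq_map]
    simp
  rw [hfold]
  -- reduce B's counting fold to countP over phone_book, then transport along the sorting permutation
  have hperm : (PySem.List.sorted phone_book (fun x => x) false).Perm phone_book :=
    PySem.List.sorted_perm phone_book (fun x => x) false
  rw [hcons] at hperm
  rw [PySem.List.foldl_ite_add_one
        (fun s => PySem.Str.slice s (some 0) (some (first.length : Int)) = first) phone_book 0,
      ← List.Perm.countP_eq _ hperm, List.countP_cons]
  have hpfirst : PySem.Str.slice first (some 0) (some (first.length : Int)) = first :=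
    (slice_eq_first_iff first first).mpr List.prefix_rfl
  rw [decide_eq_true hpfirst]
  -- both sides now reduce to: no element of rest has first as its len(first)-slice
  by_cases hmem : first ∈ rest.map (fun s => PySem.Str.slice s (some 0) (some (first.length : Int)))
  · have hpos : 0 < rest.countP
        (fun s => decide (PySem.Str.slice s (some 0) (some (first.length : Int)) = first)) := by
      obtain ⟨s, hs, hfs⟩ := List.mem_map.mp hmem
      exact List.countP_pos_iff.mpr ⟨s, hs, decide_eq_true hfs⟩
    simp only [hmem, decide_true]
    symm
    simp only [Bool.not_eq_true', beq_eq_false_iff_ne, Ne]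
    push_cast
    omega
  · have hzero : rest.countP
        (fun s => decide (PySem.Str.slice s (some 0) (some (first.length : Int)) = first)) = 0 := by
      rw [List.countP_eq_zero]
      intro s hs
      simp only [decide_eq_true_eq]
      intro hfs
      exact hmem (List.mem_map.mpr ⟨s, hs, hfs⟩)
    simp [hmem, hzero]

-- ===== VERDICT (by name: the statement is the Claim_ definition above) =====
theorem solution_spec : Claim_equal_solution := by
  intro phone_book _ hpre
  unfold Spec_solution
  exact solution_eq_alt phone_book hpre
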